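-- pv_equiv track=rewrite | github.com/whdvlf94/algorithm | coding_test/miso_2.py | solution
-- ===== SOURCE A (Python) =====
-- def solution(S):
--
--     car_num = 0
--     for i, char in enumerate(S):
--         if char == ">":
--             car_num += S[(i+1):].count(".")
--         elif char == "<":
--             car_num += S[:i].count(".")
--
--     return car_num
-- ===== SOURCE B (Python) =====
-- def solution(S):
--     total = S.count(".")
--     car_num = 0
--     prefix = 0
--     for part in S.split(">")[:-1]:
--         prefix += part.count(".")
--         car_num += total - prefix
--     prefix = 0
--     for part in S.split("<")[:-1]:
--         prefix += part.count(".")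
--         car_num += prefix
--     return car_num
-- ===== Notes on version B (the rewrite author's own statement) =====
-- stated objective: faster
-- what changed: Replaced the per-direction-character slice-and-count (a full rescan of the string for every direction char) by a precomputed total dot count and two passes over the segments of split on each direction separator, accumulating a running prefix dot count.
import Mathlib
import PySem

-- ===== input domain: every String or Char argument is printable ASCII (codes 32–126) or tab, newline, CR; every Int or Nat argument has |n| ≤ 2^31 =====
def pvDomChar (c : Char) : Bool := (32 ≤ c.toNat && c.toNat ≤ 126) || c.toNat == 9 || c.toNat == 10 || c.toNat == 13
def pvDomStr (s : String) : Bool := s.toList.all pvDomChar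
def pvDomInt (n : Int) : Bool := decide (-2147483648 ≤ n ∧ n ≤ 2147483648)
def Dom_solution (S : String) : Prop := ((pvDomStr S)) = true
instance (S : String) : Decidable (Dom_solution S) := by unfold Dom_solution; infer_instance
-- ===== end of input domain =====

-- B replaces A's per-'>'/'<' slice-and-count rescans by two split-based passes over the separator
-- segments with a running dot count (faster; measured by the check).

-- ===== PORT A =====
-- A: for each (i, char) in enumerate(S): '>' adds S[i+1:].count('.'), '<' adds S[:i].count('.')
def solution (S : String) : Int :=
  (PySem.List.enumerate S.toList 0).foldl
    (fun acc ic =>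
      if ic.2 = '>' then acc + ((PySem.List.slice S.toList (some (ic.1 + 1)) none).count '.' : Int)
      else if ic.2 = '<' then acc + ((PySem.List.slice S.toList none (some ic.1)).count '.' : Int)
      else acc) 0

-- ===== PORT B =====
-- B: total = S.count('.'); for part in S.split(">")[:-1]: prefix += part.count('.'); car += total - prefix;
--    then the same over S.split("<")[:-1] adding prefix.  (str.split(sep) ported as List.splitOn)
def solution_alt (S : String) : Int :=
  let total : Int := (S.toList.count '.' : Int)
  let st1 := ((S.toList.splitOn '>').dropLast).foldl
      (fun (st : Int × Int) part =>
        (st.1 + (part.count '.' : Int), st.2 + (total - (st.1 + (part.count '.' : Int)))))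
      ((0 : Int), (0 : Int))
  let st2 := ((S.toList.splitOn '<').dropLast).foldl
      (fun (st : Int × Int) part =>
        (st.1 + (part.count '.' : Int), st.2 + (st.1 + (part.count '.' : Int))))
      ((0 : Int), st1.2)
  st2.2

-- ===== PRECONDITION & SPEC =====
def Spec_solution (S : String) (out : Int) : Prop := out = solution_alt S
instance (S : String) (out : Int) : Decidable (Spec_solution S out) := by unfold Spec_solution; infer_instance

-- ===== CLAIM (what is proved, stated in full; the proofs are below) =====
def Claim_equal_solution : Prop := ∀ (S : String), Dom_solution S → Spec_solution S (solution S)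

-- ===== LEMMAS AND PROOFS =====

-- pvRun sep pay l pref: sum, over occurrences of sep in l, of pay applied to the number of dots
-- strictly before that occurrence (pref = dots before l in the full string).
def pvRun (sep : Char) (pay : Int → Int) : List Char → Int → Int
  | [], _ => 0
  | c :: t, pref =>
      (if c = sep then pay pref else 0) + pvRun sep pay t (pref + if c = '.' then 1 else 0)

-- A's interleaved loop computes the '>'-contributions plus the '<'-contributions.
lemma pv_A_run (l pre : List Char) (acc : Int) :
    (PySem.List.enumerate l (pre.length : Int)).foldl
      (fun acc ic =>
        if ic.2 = '>' then acc + ((PySem.List.slice (pre ++ l) (some (ic.1 + 1)) none).count '.' : Int)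
        else if ic.2 = '<' then acc + ((PySem.List.slice (pre ++ l) none (some ic.1)).count '.' : Int)
        else acc) acc
    = acc + pvRun '>' (fun p => (((pre ++ l).count '.' : Int)) - p) l ((pre.count '.' : Int))
          + pvRun '<' (fun p => p) l ((pre.count '.' : Int)) := by
  induction l generalizing pre acc with
  | nil => simp [PySem.List.enumerate, pvRun]
  | cons c t ih =>
    have hfull : pre ++ c :: t = (pre ++ [c]) ++ t := by simp
    rw [PySem.List.enumerate_cons]
    simp only [List.foldl_cons]
    have hstep : ∀ acc' : Int,
        (PySem.List.enumerate t ((pre.length : Int) + 1)).foldl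
          (fun acc ic =>
            if ic.2 = '>' then acc + ((PySem.List.slice (pre ++ c :: t) (some (ic.1 + 1)) none).count '.' : Int)
            else if ic.2 = '<' then acc + ((PySem.List.slice (pre ++ c :: t) none (some ic.1)).count '.' : Int)
            else acc) acc'
        = acc' + pvRun '>' (fun p => (((pre ++ c :: t).count '.' : Int)) - p) t (((pre ++ [c]).count '.' : Int))
               + pvRun '<' (fun p => p) t (((pre ++ [c]).count '.' : Int)) := by
      intro acc'
      have h2 := ih (pre ++ [c]) acc'
      have hlen : (((pre ++ [c]).length : Int)) = (pre.length : Int) + 1 := by simp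
      rw [hlen, ← hfull] at h2
      exact h2
    have hslice_from : PySem.List.slice (pre ++ c :: t) (some ((pre.length : Int) + 1)) none = t := by
      rw [PySem.List.slice_from _ (by positivity)]
      have h1 : ((pre.length : Int) + 1).toNat = (pre ++ [c]).length := by simp
      rw [h1, hfull, List.drop_left]
    have hslice_to : PySem.List.slice (pre ++ c :: t) none (some (pre.length : Int)) = pre := by
      rw [PySem.List.slice_to _ (by positivity)]
      simp
    by_cases h1 : c = '>'
    · subst h1
      simp only [Char.reduceEq, reduceIte]
      rw [hslice_from, hstep]
      simp only [pvRun, Char.reduceEq, reduceIte]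
      have hc : ((pre ++ '>' :: t).count '.' : Int) = (pre.count '.' : Int) + (t.count '.' : Int) := by
        simp [List.count_append, List.count_cons]
      have hc2 : (((pre ++ ['>']).count '.' : Int)) = (pre.count '.' : Int) := by
        simp [List.count_append]
      simp only [hc, hc2]; ring
    · by_cases h2 : c = '<'
      · subst h2
        simp only [Char.reduceEq, reduceIte]
        rw [hslice_to, hstep]
        simp only [pvRun, Char.reduceEq, reduceIte]
        have hc2 : (((pre ++ ['<']).count '.' : Int)) = (pre.count '.' : Int) := by
          simp [List.count_append]
        simp only [hc2]; ring
      · by_cases h3 : c = '.'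
        · subst h3
          simp only [Char.reduceEq, reduceIte]
          rw [hstep]
          simp only [pvRun, Char.reduceEq, reduceIte]
          have hc2 : (((pre ++ ['.']).count '.' : Int)) = (pre.count '.' : Int) + 1 := by
            simp [List.count_append]
          simp only [hc2]; ring
        · simp only [if_neg h1, if_neg h2, if_neg h3]
          rw [hstep]
          simp only [pvRun, if_neg h1, if_neg h2, if_neg h3]
          have hc2 : (((pre ++ [c]).count '.' : Int)) = (pre.count '.' : Int) := by
            simp [List.count_append, h3]
          simp only [hc2]; ring

-- B's fold over the parts of split(sep)[:-1] (with a pending already-consumed head piece p)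
-- computes pvRun: each separator occurrence pays pay of the dots seen so far.
lemma pv_split_run (sep : Char) (hsep : sep ≠ '.') (pay : Int → Int) (l : List Char) :
    ∀ (p : List Char) (pref car : Int),
    (((List.modifyHead (fun x => p ++ x) (l.splitOnP (· == sep))).dropLast).foldl
        (fun (st : Int × Int) part =>
          (st.1 + (part.count '.' : Int), st.2 + pay (st.1 + (part.count '.' : Int))))
        (pref, car)).2
    = car + pvRun sep pay l (pref + (p.count '.' : Int)) := by
  induction l with
  | nil => intro p pref car; simp [List.splitOnP_nil, pvRun]
  | cons c t ih =>
    intro p pref car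
    rw [List.splitOnP_cons]
    by_cases h1 : c = sep
    · subst h1
      simp only [beq_self_eq_true, if_true, List.modifyHead_cons]
      have hne := List.splitOnP_ne_nil (· == c) t
      rw [List.dropLast_cons_of_ne_nil hne]
      simp only [List.foldl_cons, List.append_nil]
      have h2 := ih [] (pref + (p.count '.' : Int)) (car + pay (pref + (p.count '.' : Int)))
      simp only [List.count_nil, Nat.cast_zero, add_zero, List.nil_append] at h2
      have hid : List.modifyHead (fun x => x) (t.splitOnP (· == c)) = t.splitOnP (· == c) :=
        congrFun List.modifyHead_id _
      rw [hid] at h2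
      rw [h2]
      simp only [pvRun, if_pos rfl, if_true, if_neg hsep]
      ring
    · have hbeq : (c == sep) = false := by simp [h1]
      rw [hbeq]
      simp only [Bool.false_eq_true, if_false]
      rw [List.modifyHead_modifyHead]
      have hcomp : ((fun x => p ++ x) ∘ (List.cons c)) = (fun x => (p ++ [c]) ++ x) := by
        funext x; simp
      rw [hcomp, ih (p ++ [c]) pref car]
      simp only [pvRun, if_neg h1]
      have hc : ((p ++ [c]).count '.' : Int) = (p.count '.' : Int) + (if c = '.' then 1 else 0) := by
        by_cases h : c = '.' <;> simp [List.count_append, h]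
      rw [hc]; ring

-- ===== VERDICT (by name: the statement is the Claim_ definition above) =====
theorem solution_spec : Claim_equal_solution := by
  intro S _
  show solution S = solution_alt S
  have hid : ∀ (a : Char), List.modifyHead (fun x => ([] : List Char) ++ x) (S.toList.splitOnP (· == a)) = S.toList.splitOnP (· == a) := by
    intro a
    have h : (fun x => ([] : List Char) ++ x) = (id : List Char → List Char) := by funext x; simp
    rw [h, List.modifyHead_id]; rfl
  have hG := pv_split_run '>' (by decide) (fun p => ((S.toList.count '.' : Int)) - p) S.toList [] 0 0
  have hL := fun car => pv_split_run '<' (by decide) (fun p => p) S.toList [] 0 car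
  simp only [List.count_nil, Nat.cast_zero, add_zero, zero_add] at hG hL
  rw [hid] at hG
  simp only [hid] at hL
  have hG' : ((((S.toList.splitOn '>').dropLast).foldl
      (fun (st : Int × Int) part =>
        (st.1 + (part.count '.' : Int), st.2 + (((S.toList.count '.' : Int)) - (st.1 + (part.count '.' : Int)))))
      ((0 : Int), (0 : Int))).2)
      = pvRun '>' (fun p => ((S.toList.count '.' : Int)) - p) S.toList 0 := hG
  have hL' : ∀ car : Int, ((((S.toList.splitOn '<').dropLast).foldl
      (fun (st : Int × Int) part =>
        (st.1 + (part.count '.' : Int), st.2 + (st.1 + (part.count '.' : Int))))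
      ((0 : Int), car)).2)
      = car + pvRun '<' (fun p => p) S.toList 0 := hL
  have hA' : solution S
      = pvRun '>' (fun p => ((S.toList.count '.' : Int)) - p) S.toList 0
        + pvRun '<' (fun p => p) S.toList 0 := by
    unfold solution
    have h := pv_A_run S.toList [] 0
    simp only [List.nil_append, List.length_nil, Nat.cast_zero, List.count_nil, zero_add] at h
    exact h
  have hB' : solution_alt S
      = pvRun '>' (fun p => ((S.toList.count '.' : Int)) - p) S.toList 0
        + pvRun '<' (fun p => p) S.toList 0 := by
    unfold solution_alt
    rw [hL', hG']
  rw [hA', hB']
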